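-- pv_equiv track=rewrite | github.com/nikbpetrov/nikbpetrov.github.io | combine_datapipe_sessions.py | summarize_duplicates
-- ===== SOURCE A (Python) =====
-- from collections import Counter, defaultdict
--
-- def summarize_duplicates(trial_indices: list[int]) -> str | None:
--     duplicates = sorted(index for index, count in Counter(trial_indices).items() if count > 1)
--     if not duplicates:
--         return None
--     preview = ", ".join(str(index) for index in duplicates[:10])
--     if len(duplicates) > 10:
--         preview += ", ..."
--     return f"Duplicate trial_index values detected: {preview}"
-- ===== SOURCE B (Python) =====
-- def summarize_duplicates(trial_indices: list[int]) -> str | None: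
--     xs = sorted(trial_indices)
--     duplicates = []
--     for prev, cur in zip(xs, xs[1:]):
--         if prev == cur and (not duplicates or duplicates[-1] != cur):
--             duplicates.append(cur)
--     if not duplicates:
--         return None
--     preview = ", ".join(str(index) for index in duplicates[:10])
--     if len(duplicates) > 10:
--         preview += ", ..."
--     return f"Duplicate trial_index values detected: {preview}"
-- ===== Notes on version B (the rewrite author's own statement) =====
-- stated objective: alternative
-- what changed: Replaces the Counter-build plus count>1 filter plus sort-of-keys pipeline by sorting the input once and collecting duplicate values in a single adjacent-pair scan of the sorted list.
import Mathlib
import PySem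

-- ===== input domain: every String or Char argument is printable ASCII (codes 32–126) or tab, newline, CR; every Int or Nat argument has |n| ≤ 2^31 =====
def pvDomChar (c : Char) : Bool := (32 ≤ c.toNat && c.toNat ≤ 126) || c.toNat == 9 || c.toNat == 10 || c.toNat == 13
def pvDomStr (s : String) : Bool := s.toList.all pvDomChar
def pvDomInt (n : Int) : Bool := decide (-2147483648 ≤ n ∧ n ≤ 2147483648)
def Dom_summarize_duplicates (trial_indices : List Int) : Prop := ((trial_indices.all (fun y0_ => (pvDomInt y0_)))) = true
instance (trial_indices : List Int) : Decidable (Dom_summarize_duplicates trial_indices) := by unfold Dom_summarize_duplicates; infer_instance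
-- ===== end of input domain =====

-- B replaces the Counter/filter/sort pipeline by one adjacent-pair scan of the sorted input (alternative decomposition, same cost).

-- ===== PORT A =====
def summarize_duplicates (trial_indices : List Int) : Option String :=
  let duplicates := PySem.List.sorted
    (((PySem.Dict.counter trial_indices).items.filter (fun p => 1 < p.2)).map (fun p => p.1))
    (fun x => x) false
  if duplicates = [] then none
  else
    let preview := PySem.Str.join ", " ((PySem.List.slice duplicates none (some 10)).map PySem.Int.toStr)
    let preview2 := if 10 < (duplicates.length : Int) then preview ++ ", ..." else preview
    some ("Duplicate trial_index values detected: " ++ preview2)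

-- ===== PORT B =====
def summarize_duplicates_alt (trial_indices : List Int) : Option String :=
  let xs := PySem.List.sorted trial_indices (fun x => x) false
  let duplicates := (xs.zip (PySem.List.slice xs (some 1) none)).foldl
    (fun dups pc => if pc.1 = pc.2 ∧ dups.getLast? ≠ some pc.2 then dups ++ [pc.2] else dups) []
  if duplicates = [] then none
  else
    let preview := PySem.Str.join ", " ((PySem.List.slice duplicates none (some 10)).map PySem.Int.toStr)
    let preview2 := if 10 < (duplicates.length : Int) then preview ++ ", ..." else preview
    some ("Duplicate trial_index values detected: " ++ preview2)

-- ===== PRECONDITION & SPEC =====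
def Spec_summarize_duplicates (trial_indices : List Int) (out : Option String) : Prop := out = summarize_duplicates_alt trial_indices
instance (trial_indices : List Int) (out : Option String) : Decidable (Spec_summarize_duplicates trial_indices out) := by unfold Spec_summarize_duplicates; infer_instance

-- ===== CLAIM (what is proved, stated in full; the proofs are below) =====
def Claim_equal_summarize_duplicates : Prop := ∀ (trial_indices : List Int), Dom_summarize_duplicates trial_indices → Spec_summarize_duplicates trial_indices (summarize_duplicates trial_indices)

-- ===== LEMMAS AND PROOFS =====

theorem getLast_bound_of_pairwise_lt : ∀ (acc : List Int) (l : Int), acc.Pairwise (· < ·) →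
    acc.getLast? = some l → l ∈ acc ∧ ∀ x ∈ acc, x ≤ l := by
  intro acc
  induction acc with
  | nil => intro l _ h; simp at h
  | cons c cs ih =>
    intro l hp hl
    cases cs with
    | nil =>
      simp [List.getLast?_singleton] at hl
      subst hl
      exact ⟨List.mem_singleton_self _, by intro x hx; simp at hx; omega⟩
    | cons d ds =>
      rw [List.getLast?_cons_cons] at hl
      obtain ⟨hlm, hb⟩ := ih l (List.pairwise_cons.mp hp).2 hl
      refine ⟨List.mem_cons_of_mem _ hlm, ?_⟩
      intro x hx
      rcases List.mem_cons.mp hx with rfl | hx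
      · have := (List.pairwise_cons.mp hp).1 l hlm; omega
      · exact hb x hx

theorem dupsFold_spec : ∀ (s : List Int), s.Pairwise (· ≤ ·) → ∀ (acc : List Int),
    acc.Pairwise (· < ·) → (∀ x ∈ acc, ∀ y ∈ s, x ≤ y) →
    ((s.zip s.tail).foldl
      (fun dups pc => if pc.1 = pc.2 ∧ dups.getLast? ≠ some pc.2 then dups ++ [pc.2] else dups) acc).Pairwise (· < ·) ∧
    ∀ v, (v ∈ (s.zip s.tail).foldl
      (fun dups pc => if pc.1 = pc.2 ∧ dups.getLast? ≠ some pc.2 then dups ++ [pc.2] else dups) acc ↔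
      v ∈ acc ∨ (2 ≤ s.count v ∧ acc.getLast? ≠ some v)) := by
  intro s
  induction s with
  | nil =>
    intro _ acc hacc _
    refine ⟨hacc, ?_⟩
    intro v
    simp
  | cons a rest ih =>
    intro hs acc hacc hbound
    cases rest with
    | nil =>
      simp only [List.tail_cons, List.zip_nil_right, List.foldl_nil]
      refine ⟨hacc, ?_⟩
      intro v
      constructor
      · exact fun hv => Or.inl hv
      · rintro (hv | ⟨hc, _⟩)
        · exact hv
        · exfalso; rw [List.count_cons, List.count_nil] at hc; split_ifs at hc <;> omega
    | cons b t =>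
      have hzip : ((a::b::t).zip (a::b::t).tail) = (a,b) :: ((b::t).zip (b::t).tail) := rfl
      rw [hzip, List.foldl_cons]
      have hs' : (b::t).Pairwise (· ≤ ·) := (List.pairwise_cons.mp hs).2
      have hab : a ≤ b := (List.pairwise_cons.mp hs).1 b (List.mem_cons_self)
      have hat : ∀ y ∈ t, a ≤ y := fun y hy => (List.pairwise_cons.mp hs).1 y (List.mem_cons_of_mem _ hy)
      have hbt : ∀ y ∈ t, b ≤ y := fun y hy => (List.pairwise_cons.mp hs').1 y hy
      by_cases hcond : a = b ∧ acc.getLast? ≠ some b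
      · obtain ⟨haeq, hlastne⟩ := hcond
        rw [if_pos ⟨haeq, hlastne⟩]
        have hlt : ∀ x ∈ acc, x < b := by
          intro x hx
          have hxb : x ≤ b := hbound x hx b (List.mem_cons_of_mem _ List.mem_cons_self)
          rcases lt_or_eq_of_le hxb with h | h
          · exact h
          · exfalso
            cases hacc_last : acc.getLast? with
            | none =>
              rw [List.getLast?_eq_none_iff] at hacc_last
              subst hacc_last; simp at hx
            | some l =>
              obtain ⟨hlm, hb2⟩ := getLast_bound_of_pairwise_lt acc l hacc hacc_last
              have h1 : x ≤ l := hb2 x hx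
              have h2 : l ≤ b := hbound l hlm b (List.mem_cons_of_mem _ List.mem_cons_self)
              have hlb : l = b := by omega
              rw [hlb] at hacc_last
              exact hlastne hacc_last
        have hacc'p : (acc ++ [b]).Pairwise (· < ·) := by
          rw [List.pairwise_append]
          refine ⟨hacc, List.pairwise_singleton _ _, ?_⟩
          intro x hx y hy
          simp at hy; subst hy
          exact hlt x hx
        have hbound' : ∀ x ∈ acc ++ [b], ∀ y ∈ b::t, x ≤ y := by
          intro x hx y hy
          rcases List.mem_append.mp hx with hx | hx
          · exact hbound x hx y (List.mem_cons_of_mem _ hy)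
          · simp at hx; subst hx
            rcases List.mem_cons.mp hy with rfl | hy
            · exact le_refl _
            · exact hbt y hy
        obtain ⟨hp, hmem⟩ := ih hs' (acc ++ [b]) hacc'p hbound'
        refine ⟨hp, ?_⟩
        intro v
        rw [hmem v]
        have hlast' : (acc ++ [b]).getLast? = some b := by simp
        rw [hlast']
        by_cases hv : v = b
        · subst hv
          constructor
          · intro _
            right
            refine ⟨?_, hlastne⟩
            subst haeq
            simp
          · intro _
            left
            simp
        · have hvmem : v ∈ acc ++ [b] ↔ v ∈ acc := by simp [hv]
          have hcnt : (a::b::t).count v = (b::t).count v := by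
            subst haeq
            simp [List.count_cons]
            intro h; exact absurd h.symm hv
          rw [hvmem, hcnt]
          constructor
          · rintro (hva | ⟨hc, _⟩)
            · exact Or.inl hva
            · by_cases hgl : acc.getLast? = some v
              · obtain ⟨hlm, _⟩ := getLast_bound_of_pairwise_lt acc v hacc hgl
                exact Or.inl hlm
              · exact Or.inr ⟨hc, hgl⟩
          · rintro (hva | ⟨hc, hgl⟩)
            · exact Or.inl hva
            · refine Or.inr ⟨hc, ?_⟩
              intro h
              rw [Option.some_inj] at h
              exact hv h.symm
      · rw [if_neg hcond]
        have hbound'' : ∀ x ∈ acc, ∀ y ∈ b::t, x ≤ y :=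
          fun x hx y hy => hbound x hx y (List.mem_cons_of_mem _ hy)
        obtain ⟨hp, hmem⟩ := ih hs' acc hacc hbound''
        refine ⟨hp, ?_⟩
        intro v
        rw [hmem v]
        by_cases haeq : a = b
        · have hgl : acc.getLast? = some b := by
            by_contra hne
            exact hcond ⟨haeq, hne⟩
          by_cases hv : v = b
          · subst hv
            rw [hgl]
            simp
          · have hcnt : (a::b::t).count v = (b::t).count v := by
              subst haeq
              simp [List.count_cons]
              intro h; exact absurd h.symm hv
            rw [hcnt]
        · by_cases hv : v = a
          · have hvb : v < b := by rw [hv]; exact lt_of_le_of_ne hab haeq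
            have hnotin : v ∉ b :: t := by
              intro hm
              rcases List.mem_cons.mp hm with rfl | hm
              · omega
              · have := hbt v hm; omega
            have hc0 : (b::t).count v = 0 := List.count_eq_zero.mpr hnotin
            have hc1 : (a::b::t).count v = 1 := by
              rw [List.count_cons, hc0, hv]; simp
            rw [hc0, hc1]
            simp
          · have hcnt : (a::b::t).count v = (b::t).count v := by
              simp [List.count_cons]
              intro h; exact absurd h.symm hv
            rw [hcnt]

theorem dup_lists_eq (xs : List Int) :
    PySem.List.sorted (((PySem.Dict.counter xs).items.filter (fun p => 1 < p.2)).map (fun p => p.1)) (fun x => x) false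
    = ((PySem.List.sorted xs (fun x => x) false).zip (PySem.List.slice (PySem.List.sorted xs (fun x => x) false) (some 1) none)).foldl
        (fun dups pc => if pc.1 = pc.2 ∧ dups.getLast? ≠ some pc.2 then dups ++ [pc.2] else dups) [] := by
  rw [PySem.List.slice_from_one]
  have hs : (PySem.List.sorted xs (fun x => x) false).Pairwise (· ≤ ·) :=
    PySem.List.sorted_pairwise xs (fun x => x)
  obtain ⟨hp, hmem⟩ := dupsFold_spec _ hs [] List.Pairwise.nil (by simp)
  have hmemr : ∀ v, v ∈ ((PySem.List.sorted xs (fun x => x) false).zip (PySem.List.sorted xs (fun x => x) false).tail).foldl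
        (fun dups pc => if pc.1 = pc.2 ∧ dups.getLast? ≠ some pc.2 then dups ++ [pc.2] else dups) [] ↔ 2 ≤ xs.count v := by
    intro v
    rw [hmem v]
    have : (PySem.List.sorted xs (fun x => x) false).count v = xs.count v :=
      (PySem.List.sorted_perm xs (fun x => x) false).count_eq v
    simp [this]
  have hA : ((PySem.Dict.counter xs).items.filter (fun p => 1 < p.2)).map (fun p => p.1)
      = (PySem.Set.ofList xs).filter (fun k => decide (1 < (xs.count k : Int))) := by
    rw [PySem.Dict.items_counter, List.filter_map, List.map_map]
    simp [Function.comp_def]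
  rw [hA]
  apply PySem.List.sorted_eq_of_perm_of_pairwise_lt
  · rw [List.perm_ext_iff_of_nodup]
    · intro v
      rw [hmemr v, List.mem_filter, PySem.Set.mem_ofList]
      constructor
      · intro h
        refine ⟨List.count_pos_iff.mp (by omega), by simp; omega⟩
      · rintro ⟨_, h⟩
        simp at h
        omega
    · exact hp.imp (fun h => ne_of_lt h)
    · exact (PySem.Set.nodup_ofList xs).filter _
  · exact hp

-- ===== VERDICT (by name: the statement is the Claim_ definition above) =====
theorem summarize_duplicates_spec : Claim_equal_summarize_duplicates := by
  intro xs _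
  unfold Spec_summarize_duplicates summarize_duplicates summarize_duplicates_alt
  rw [dup_lists_eq]
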